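-- pv_equiv track=rewrite | github.com/JavierMenRev/softmask2BED | softmask2BED.py | find_lowercase_stretches
-- ===== SOURCE A (Python) =====
-- def find_lowercase_stretches(seq):
--     stretches = []
--     in_stretch = False
--     start = None
--
--     for i, nucleotide in enumerate(seq):
--         if nucleotide.islower():
--             if not in_stretch:
--                 start = i
--                 in_stretch = True
--         else:
--             if in_stretch:
--                 end = i - 1
--                 stretches.append((start, end))
--                 in_stretch = False
--
--     if in_stretch:
--         stretches.append((start, len(seq) - 1))
--
--     return stretches
-- ===== SOURCE B (Python) =====
-- def find_lowercase_stretches(seq):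
--     stretches = []
--     n = len(seq)
--     i = 0
--     while i < n:
--         if seq[i].islower():
--             j = i
--             while j + 1 < n and seq[j + 1].islower():
--                 j += 1
--             stretches.append((i, j))
--             i = j + 1
--         else:
--             i += 1
--     return stretches
-- ===== Notes on version B (the rewrite author's own statement) =====
-- stated objective: alternative
-- what changed: Replaced the flag-based state machine (in_stretch/start carried across every character, plus a trailing flush using len(seq)-1) with a two-pointer scan over runs: on meeting a lowercase char an inner loop advances to the run's last lowercase index and the interval is emitted immediately, so no cross-iteration flags and no post-loop fixup exist.
import Mathlib
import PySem

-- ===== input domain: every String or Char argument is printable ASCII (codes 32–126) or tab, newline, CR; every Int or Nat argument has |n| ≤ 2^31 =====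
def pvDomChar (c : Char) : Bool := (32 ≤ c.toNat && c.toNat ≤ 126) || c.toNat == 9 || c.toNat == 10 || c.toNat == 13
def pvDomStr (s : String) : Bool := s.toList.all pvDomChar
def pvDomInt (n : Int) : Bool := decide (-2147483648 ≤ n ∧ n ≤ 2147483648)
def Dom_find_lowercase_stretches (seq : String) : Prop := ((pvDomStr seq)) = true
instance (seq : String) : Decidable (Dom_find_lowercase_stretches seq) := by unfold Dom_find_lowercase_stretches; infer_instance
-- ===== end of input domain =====

-- B replaces A's per-character flag state machine by a two-pointer scan over runs (same O(n) cost, no cross-iteration flags).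

-- ===== PORT A =====
-- state: (stretches, in_stretch, start); `start.getD 0` is only evaluated when in_stretch, where start = some _
def stepA (st : List (Int × Int) × Bool × Option Int) (p : Int × Char) : List (Int × Int) × Bool × Option Int :=
  if PySem.Chars.islower p.2 then
    if !st.2.1 then (st.1, true, some p.1) else st
  else
    if st.2.1 then (st.1 ++ [(st.2.2.getD 0, p.1 - 1)], false, st.2.2) else st

def find_lowercase_stretches (seq : String) : List (Int × Int) :=
  let st := (PySem.List.enumerate seq.toList 0).foldl stepA ([], false, none)
  if st.2.1 then st.1 ++ [(st.2.2.getD 0, (PySem.Str.len seq : Int) - 1)] else st.1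

-- ===== PORT B =====
-- inner `while j + 1 < n and seq[j+1].islower(): j += 1`: advance j over the lowercase run, return (j, remaining cursor)
def runEndB (j : Int) : List Char → Int × List Char
  | [] => (j, [])
  | c :: rest => if PySem.Chars.islower c then runEndB (j + 1) rest else (j, c :: rest)

theorem runEndB_len (j : Int) (xs : List Char) : (runEndB j xs).2.length ≤ xs.length := by
  induction xs generalizing j with
  | nil => simp [runEndB]
  | cons c rest ih =>
    simp only [runEndB]
    split
    · exact le_trans (ih _) (by simp)
    · simp

-- outer while loop: i is the cursor, the list is the remaining suffix seq[i:]
def runsB (i : Int) : List Char → List (Int × Int)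
  | [] => []
  | c :: rest =>
    if PySem.Chars.islower c then
      let p := runEndB i rest
      (i, p.1) :: runsB (p.1 + 1) p.2
    else
      runsB (i + 1) rest
termination_by xs => xs.length
decreasing_by
  · exact Nat.lt_succ_of_le (runEndB_len i rest)
  · simp

def find_lowercase_stretches_alt (seq : String) : List (Int × Int) :=
  runsB 0 seq.toList

-- ===== PRECONDITION & SPEC =====
def Spec_find_lowercase_stretches (seq : String) (out : List (Int × Int)) : Prop := out = find_lowercase_stretches_alt seq
instance (seq : String) (out : List (Int × Int)) : Decidable (Spec_find_lowercase_stretches seq out) := by unfold Spec_find_lowercase_stretches; infer_instance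

-- ===== CLAIM (what is proved, stated in full; the proofs are below) =====
def Claim_equal_find_lowercase_stretches : Prop := ∀ (seq : String), Dom_find_lowercase_stretches seq → Spec_find_lowercase_stretches seq (find_lowercase_stretches seq)

-- ===== LEMMAS AND PROOFS =====
-- A's "flush" of the final state, parameterised by the last index of the whole input
def finishA (last : Int) (st : List (Int × Int) × Bool × Option Int) : List (Int × Int) :=
  if st.2.1 then st.1 ++ [(st.2.2.getD 0, last)] else st.1

-- the joint invariant: running A's fold over the suffix xs (with cursor i) from an
-- out-of-stretch state yields acc ++ runsB i xs, and from an in-stretch state (start s)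
-- it yields acc ++ the current run closed by runEndB followed by runsB on the remainder
theorem main_inv (xs : List Char) :
    (∀ (i : Int) (acc : List (Int × Int)) (st0 : Option Int),
      finishA (i + xs.length - 1) ((PySem.List.enumerate xs i).foldl stepA (acc, false, st0)) =
        acc ++ runsB i xs) ∧
    (∀ (i s : Int) (acc : List (Int × Int)),
      finishA (i + xs.length - 1) ((PySem.List.enumerate xs i).foldl stepA (acc, true, some s)) =
        acc ++ ((s, (runEndB (i - 1) xs).1) :: runsB ((runEndB (i - 1) xs).1 + 1) (runEndB (i - 1) xs).2)) := by
  induction xs with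
  | nil =>
    constructor
    · intro i acc st0; simp [PySem.List.enumerate_nil, finishA, runsB]
    · intro i s acc; simp [PySem.List.enumerate_nil, finishA, runEndB, runsB]
  | cons c rest ih =>
    have e : ∀ i : Int, (i + 1 : Int) + rest.length - 1 = i + (c :: rest).length - 1 := by
      intro i; simp only [List.length_cons]; push_cast; ring
    constructor
    · intro i acc st0
      rw [PySem.List.enumerate_cons]
      by_cases hc : PySem.Chars.islower c
      · simp only [List.foldl_cons, stepA, hc, Bool.not_false, Bool.false_eq_true, if_false, if_true]
        have h2 := ih.2 (i + 1) i acc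
        rw [e i] at h2
        rw [h2]
        simp only [runsB, hc, if_true]
        rw [show (i + 1 : Int) - 1 = i by ring]
      · simp only [List.foldl_cons, stepA, hc, Bool.false_eq_true, if_false]
        have h1 := ih.1 (i + 1) acc st0
        rw [e i] at h1
        rw [h1]
        simp [runsB, hc]
    · intro i s acc
      rw [PySem.List.enumerate_cons]
      by_cases hc : PySem.Chars.islower c
      · simp only [List.foldl_cons, stepA, hc, Bool.not_true, Bool.false_eq_true, if_false, if_true]
        have h2 := ih.2 (i + 1) s acc
        rw [e i] at h2
        rw [h2]
        have hr : runEndB (i - 1) (c :: rest) = runEndB ((i + 1) - 1) rest := by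
          simp only [runEndB, hc, if_true]; norm_num
        rw [hr]
      · simp only [List.foldl_cons, stepA, hc, Bool.false_eq_true, if_false, if_true, Option.getD_some]
        have h1 := ih.1 (i + 1) (acc ++ [(s, i - 1)]) (some s)
        rw [e i] at h1
        rw [h1]
        have hr : runEndB (i - 1) (c :: rest) = (i - 1, c :: rest) := by
          simp [runEndB, hc]
        rw [hr]
        simp only [runsB, hc, Bool.false_eq_true, if_false]
        rw [show (i - 1 : Int) + 1 = i by ring, List.append_assoc]
        simp only [List.singleton_append]

-- ===== VERDICT (by name: the statement is the Claim_ definition above) =====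
theorem find_lowercase_stretches_spec : Claim_equal_find_lowercase_stretches := by
  intro seq _
  unfold Spec_find_lowercase_stretches find_lowercase_stretches find_lowercase_stretches_alt
  have h := (main_inv seq.toList).1 0 [] none
  simp only [zero_add] at h
  rw [show ((PySem.Str.len seq : Int) - 1) = (seq.toList.length : Int) - 1 by
        simp [PySem.Str.len_eq]]
  exact h
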